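-- pv_equiv track=rewrite | github.com/ElkeVSant/AdventOfCode2024 | day7/main.py | evaluates
-- ===== SOURCE A (Python) =====
-- def evaluates(
--     test_value: int, result: int, eq: list[int], operators: list[str]
-- ) -> bool:
--     result = result
--     rest_eq = eq[:]
--     if result > test_value:
--         return False
--     nb = rest_eq.pop(0)
--     if "+" in operators and (
--         ((new_result := result + nb) == test_value and not rest_eq)
--         or (rest_eq and evaluates(test_value, new_result, rest_eq, operators))
--     ):
--         return True
--     if "*" in operators and (
--         ((new_result := result * nb) == test_value and not rest_eq)
--         or (rest_eq and evaluates(test_value, new_result, rest_eq, operators))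
--     ):
--         return True
--     if "||" in operators and (
--         ((new_result := int(str(result) + str(nb))) == test_value and not rest_eq)
--         or (rest_eq and evaluates(test_value, new_result, rest_eq, operators))
--     ):
--         return True
--     return False
-- ===== SOURCE B (Python) =====
-- def evaluates(test_value, result, eq, operators):
--     # Iterative DP over a set of reachable accumulated values instead of A's
--     # branch-per-operator recursion.  Concatenation is skipped for negative nb,
--     # where Python's int(str(v) + str(nb)) is undefined (A raises ValueError there).
--     if result > test_value:
--         return False
--
--     def steps(v, nb):
--         out = []
--         if "+" in operators:
--             out.append(v + nb)
--         if "*" in operators: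
--             out.append(v * nb)
--         if "||" in operators and nb >= 0:
--             out.append(int(str(v) + str(nb)))
--         return out
--
--     last = eq[-1]
--     frontier = {result}
--     for nb in eq[:-1]:
--         frontier = {w for v in frontier for w in steps(v, nb) if w <= test_value}
--     return any(test_value in steps(v, last) for v in frontier)
-- ===== Notes on version B (the rewrite author's own statement) =====
-- stated objective: alternative
-- what changed: Replaced the branch-per-operator exponential recursion by an iterative dynamic-programming pass that carries a deduplicated set of reachable accumulated values (pruned to <= test_value) across the number list and tests membership of test_value after the last number; concatenation is skipped for negative right operands, exactly where Python's int(str(v)+str(nb)) is undefined, so B returns A's value on every input where A returns.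
-- outside the precondition, e.g. on evaluates(5, 3, [], ['+']): A raises IndexError, B raises IndexError; on evaluates(2, 0, [3, -1], ['+', '||']): A returns False, B returns False
-- crash fix: On inputs with result <= test_value, '||' among the operators and a negative number in eq, A can raise ValueError from int(str(v)+str(nb)) mid-search; B returns the correct boolean there (an undefined concatenation is simply not a reachable value). — e.g. on evaluates(3, 0, [3, -1], ["+", "||"]): A raises ValueError, B returns false
import Mathlib
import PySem

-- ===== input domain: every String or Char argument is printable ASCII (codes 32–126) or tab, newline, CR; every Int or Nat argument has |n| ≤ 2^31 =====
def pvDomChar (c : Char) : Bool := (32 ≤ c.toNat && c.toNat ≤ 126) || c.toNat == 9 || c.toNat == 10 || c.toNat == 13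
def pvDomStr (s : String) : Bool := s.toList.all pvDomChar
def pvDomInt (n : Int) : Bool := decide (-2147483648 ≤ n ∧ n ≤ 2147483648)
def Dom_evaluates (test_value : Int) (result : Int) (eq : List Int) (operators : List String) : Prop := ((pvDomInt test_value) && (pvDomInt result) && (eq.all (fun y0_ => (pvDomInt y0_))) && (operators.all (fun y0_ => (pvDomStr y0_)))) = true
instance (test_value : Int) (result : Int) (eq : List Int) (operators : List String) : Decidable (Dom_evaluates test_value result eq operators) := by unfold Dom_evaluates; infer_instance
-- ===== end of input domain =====

-- B replaces A's exponential branch-per-operator recursion by an iterative DP over a set of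
-- reachable accumulated values (objective: alternative algorithm of different structure).

-- ===== PORT A =====
-- int(str(v) + str(nb)); total stand-in: none (Python ValueError, excluded by Pre_) ↦ 0
def pvConcat (v nb : Int) : Int :=
  (PySem.Int.ofStr? (PySem.Int.toStr v ++ PySem.Int.toStr nb)).getD 0

def evaluates (test_value : Int) (result : Int) (eq : List Int) (operators : List String) : Bool :=
  if result > test_value then false
  else
    match eq with
    | [] => false  -- Python raises IndexError here (pop from empty list); excluded by Pre_
    | nb :: rest_eq =>
      if operators.contains "+" &&
          ((decide (result + nb = test_value) && rest_eq.isEmpty) ||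
           (!rest_eq.isEmpty && evaluates test_value (result + nb) rest_eq operators)) then true
      else if operators.contains "*" &&
          ((decide (result * nb = test_value) && rest_eq.isEmpty) ||
           (!rest_eq.isEmpty && evaluates test_value (result * nb) rest_eq operators)) then true
      else if operators.contains "||" &&
          ((decide (pvConcat result nb = test_value) && rest_eq.isEmpty) ||
           (!rest_eq.isEmpty && evaluates test_value (pvConcat result nb) rest_eq operators)) then true
      else false

-- ===== PORT B =====
-- the list produced by Source B's steps(v, nb); concatenation only for 0 ≤ nb (Source B's 'nb >= 0' guard:
-- for negative nb Python's int(str(v)+str(nb)) is undefined)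
def pvSteps (operators : List String) (v nb : Int) : List Int :=
  (if operators.contains "+" then [v + nb] else []) ++
  (if operators.contains "*" then [v * nb] else []) ++
  (if operators.contains "||" && decide (0 ≤ nb) then [pvConcat v nb] else [])

def evaluates_alt (test_value : Int) (result : Int) (eq : List Int) (operators : List String) : Bool :=
  if result > test_value then false
  else
    match eq with
    | [] => false  -- Python raises IndexError here (eq[-1]); excluded by Pre_
    | h :: t =>
      let last := (h :: t).getLast (by simp)
      let frontier : PySem.Set Int :=
        (h :: t).dropLast.foldl
          (fun fr nb =>
            PySem.Set.ofList ((fr.flatMap (fun v => pvSteps operators v nb)).filter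
              (fun w => decide (w ≤ test_value))))
          (PySem.Set.ofList [result])
      frontier.any (fun v => (pvSteps operators v last).contains test_value)

-- ===== PRECONDITION & SPEC =====
-- Pre_ excludes (a) empty eq with result ≤ test_value, where both A and B raise IndexError, and
-- (b) inputs where '||' is among the operators and eq holds a negative number, on which A can raise
-- ValueError from int(str(v)+str(nb)) mid-search; this exclusion is conservative, and on excluded
-- inputs where A happens to return, B returns the same value (B skips the undefined concatenation
-- exactly where Python's int() fails, so such a step is never on a successful path of A).
def Pre_evaluates (test_value : Int) (result : Int) (eq : List Int) (operators : List String) : Prop :=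
  (eq ≠ [] ∨ result > test_value) ∧
  (result ≤ test_value → "||" ∈ operators → ∀ x ∈ eq, 0 ≤ x)
instance (test_value : Int) (result : Int) (eq : List Int) (operators : List String) : Decidable (Pre_evaluates test_value result eq operators) := by unfold Pre_evaluates; infer_instance

def pvWitness_evaluates : Int × Int × List Int × List String := (190, 10, [19, 10], ["+", "*"])

-- On inputs with result ≤ test_value, '||' among the operators and a negative number in eq, A can
-- raise ValueError from int(str(v)+str(nb)) mid-search; B returns the correct boolean there.
def Raises_evaluates (test_value : Int) (result : Int) (eq : List Int) (operators : List String) : Prop :=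
  result ≤ test_value ∧ "||" ∈ operators ∧ ∃ x ∈ eq, x < 0
instance (test_value : Int) (result : Int) (eq : List Int) (operators : List String) : Decidable (Raises_evaluates test_value result eq operators) := by unfold Raises_evaluates; infer_instance

def pvRaiseWitness_evaluates : Int × Int × List Int × List String := (3, 0, [3, -1], ["+", "||"])
def pvRaiseWitnessOut_evaluates : Bool := false

def Spec_evaluates (test_value : Int) (result : Int) (eq : List Int) (operators : List String) (out : Bool) : Prop := out = evaluates_alt test_value result eq operators
instance (test_value : Int) (result : Int) (eq : List Int) (operators : List String) (out : Bool) : Decidable (Spec_evaluates test_value result eq operators out) := by unfold Spec_evaluates; infer_instance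

-- ===== CLAIM (what is proved, stated in full; the proofs are below) =====
def Claim_equal_evaluates : Prop := ∀ (test_value : Int) (result : Int) (eq : List Int) (operators : List String), Dom_evaluates test_value result eq operators → Pre_evaluates test_value result eq operators → Spec_evaluates test_value result eq operators (evaluates test_value result eq operators)

def Claim_raises_evaluates : Prop := (∀ (test_value : Int) (result : Int) (eq : List Int) (operators : List String), Dom_evaluates test_value result eq operators → Raises_evaluates test_value result eq operators → ¬ Pre_evaluates test_value result eq operators) ∧ (Dom_evaluates (pvRaiseWitness_evaluates.1) (pvRaiseWitness_evaluates.2.1) (pvRaiseWitness_evaluates.2.2.1) (pvRaiseWitness_evaluates.2.2.2) ∧ Raises_evaluates (pvRaiseWitness_evaluates.1) (pvRaiseWitness_evaluates.2.1) (pvRaiseWitness_evaluates.2.2.1) (pvRaiseWitness_evaluates.2.2.2) ∧ evaluates_alt (pvRaiseWitness_evaluates.1) (pvRaiseWitness_evaluates.2.1) (pvRaiseWitness_evaluates.2.2.1) (pvRaiseWitness_evaluates.2.2.2) = pvRaiseWitnessOut_evaluates)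

-- ===== LEMMAS AND PROOFS =====

-- A's entry guard: a too-large accumulated value is dead.
theorem eval_guard (tv v : Int) (l : List Int) (ops : List String) (h : tv < v) :
    evaluates tv v l ops = false := by
  unfold evaluates
  simp [show v > tv from h]

-- pointwise congruence for List.any
theorem any_congr_mem {α : Type} (l : List α) (p q : α → Bool)
    (h : ∀ a ∈ l, p a = q a) : l.any p = l.any q := by
  induction l with
  | nil => rfl
  | cons a t ih =>
    simp only [List.any_cons, h a (by simp), ih (fun x hx => h x (by simp [hx]))]

-- one unfolding of A in terms of Source B's steps list (needs 0 ≤ nb when '||' is available,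
-- i.e. inside Pre_, where A's concat is defined and Source B's guard keeps it)
theorem eval_cons (tv v nb : Int) (rest : List Int) (ops : List String)
    (hv : v ≤ tv) (hc : "||" ∈ ops → 0 ≤ nb) :
    evaluates tv v (nb :: rest) ops =
      if rest.isEmpty then (pvSteps ops v nb).contains tv
      else (pvSteps ops v nb).any (fun w => evaluates tv w rest ops) := by
  conv_lhs => rw [evaluates]
  rcases rest with _ | ⟨r, rs⟩ <;>
    by_cases hp : "+" ∈ ops <;> by_cases hm : "*" ∈ ops <;> by_cases hcc : "||" ∈ ops <;>
      simp [pvSteps, hp, hm, hcc, hc, show ¬ v > tv by omega] <;>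
      simp [eq_comm]

-- B's frontier loop computes "some start value in S makes A succeed on body ++ [last]".
theorem loop_char (tv : Int) (ops : List String) (body : List Int) (last : Int)
    (hl : "||" ∈ ops → 0 ≤ last) (hb : "||" ∈ ops → ∀ x ∈ body, 0 ≤ x) :
    ∀ (S : List Int), (∀ v ∈ S, v ≤ tv) →
      ((body.foldl
          (fun fr nb =>
            PySem.Set.ofList ((fr.flatMap (fun v => pvSteps ops v nb)).filter
              (fun w => decide (w ≤ tv)))) S).any
        (fun v => (pvSteps ops v last).contains tv))
        = S.any (fun v => evaluates tv v (body ++ [last]) ops) := by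
  induction body with
  | nil =>
    intro S hS
    simp only [List.foldl_nil, List.nil_append]
    refine (any_congr_mem S _ _ ?_).symm
    intro v hv
    rw [eval_cons tv v last [] ops (hS v hv) hl]
    simp
  | cons nb body' ih =>
    intro S hS
    simp only [List.foldl_cons, List.cons_append]
    rw [ih (fun h x hx => hb h x (by simp [hx])) _
          (by intro v hv
              have := (List.mem_filter.mp ((PySem.Set.mem_ofList _ _).mp hv)).2
              simpa using this)]
    rw [any_congr_mem S _ _ (fun v hv =>
          eval_cons tv v nb (body' ++ [last]) ops (hS v hv) (fun h => hb h nb (by simp)))]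
    rw [Bool.eq_iff_iff]
    simp only [List.any_eq_true, PySem.Set.mem_ofList, List.mem_filter, List.mem_flatMap,
      decide_eq_true_eq]
    constructor
    · rintro ⟨w, ⟨⟨v, hvS, hw⟩, hle⟩, hev⟩
      refine ⟨v, hvS, ?_⟩
      rw [if_neg (by simp)]
      exact List.any_eq_true.mpr ⟨w, hw, hev⟩
    · rintro ⟨v, hvS, hev⟩
      rw [if_neg (by simp)] at hev
      rcases List.any_eq_true.mp hev with ⟨w, hw, hevw⟩
      by_cases hle : w ≤ tv
      · exact ⟨w, ⟨⟨v, hvS, hw⟩, hle⟩, hevw⟩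
      · rw [eval_guard tv w _ ops (by omega)] at hevw
        exact absurd hevw (by simp)

-- ===== VERDICT (by name: the statements are the Claim_ definitions above) =====
theorem evaluates_spec : Claim_equal_evaluates := by
  intro tv r eq ops _ hpre
  unfold Spec_evaluates
  by_cases hg : r > tv
  · rw [eval_guard tv r eq ops hg]
    unfold evaluates_alt
    simp [hg]
  · have heq : eq ≠ [] := by
      rcases hpre.1 with h | h
      · exact h
      · omega
    have hnn : "||" ∈ ops → ∀ x ∈ eq, 0 ≤ x := hpre.2 (by omega)
    rcases eq with _ | ⟨h, t⟩
    · exact absurd rfl heq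
    · unfold evaluates_alt
      rw [if_neg hg]
      simp only
      rw [loop_char tv ops ((h :: t).dropLast) ((h :: t).getLast (by simp))
            (fun hm => hnn hm _ (List.getLast_mem _))
            (fun hm x hx => hnn hm x (List.dropLast_subset _ hx))
            (PySem.Set.ofList [r])
            (by intro v hv; simp [PySem.Set.ofList] at hv; omega)]
      rw [List.dropLast_append_getLast (by simp)]
      simp [PySem.Set.ofList]

@[simp] theorem evaluates_raises : Claim_raises_evaluates := by
  unfold Claim_raises_evaluates
  refine ⟨?_, by decide⟩
  rintro tv r eq ops _ ⟨h1, h2, x, hx, hneg⟩ ⟨_, h4⟩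
  have := h4 h1 h2 x hx
  omega
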